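-- pv_equiv track=rewrite | github.com/Aryudesu/ABC | typical90/084.py | calc
-- ===== SOURCE A (Python) =====
-- def calc(N, S):
--     x_idx = -1
--     o_idx = -1
--     result = 0
--     for idx in range(N):
--         if S[idx] == "o":
--             o_idx = idx
--         elif S[idx] == "x":
--             x_idx = idx
--         if o_idx >= 0 and x_idx >= 0:
--             if S[idx] == "o":
--                 result += x_idx + 1
--             elif S[idx] == "x":
--                 result += o_idx + 1
--     return result
-- ===== SOURCE B (Python) =====
-- def calc(N, S):
--     # two-pass decomposition: precompute prefix "last index of x / o" arrays, then sum contributions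
--     chars = []
--     last_x = []
--     last_o = []
--     lx = -1
--     lo = -1
--     for i in range(N):
--         c = S[i]
--         if c == "x":
--             lx = i
--         elif c == "o":
--             lo = i
--         chars.append(c)
--         last_x.append(lx)
--         last_o.append(lo)
--     total = 0
--     for c, (lx, lo) in zip(chars, zip(last_x, last_o)):
--         if c == "o" and lx >= 0:
--             total += lx + 1
--         elif c == "x" and lo >= 0:
--             total += lo + 1
--     return total
-- ===== Notes on version B (the rewrite author's own statement) =====
-- stated objective: alternative
-- what changed: Replaces A's single fused loop (mutable x_idx/o_idx plus a both-seen guard checked every step) by a two-pass decomposition: first precompute prefix arrays last_x/last_o, then sum each position's contribution from those arrays with only the opposite-side guard.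
import Mathlib
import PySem

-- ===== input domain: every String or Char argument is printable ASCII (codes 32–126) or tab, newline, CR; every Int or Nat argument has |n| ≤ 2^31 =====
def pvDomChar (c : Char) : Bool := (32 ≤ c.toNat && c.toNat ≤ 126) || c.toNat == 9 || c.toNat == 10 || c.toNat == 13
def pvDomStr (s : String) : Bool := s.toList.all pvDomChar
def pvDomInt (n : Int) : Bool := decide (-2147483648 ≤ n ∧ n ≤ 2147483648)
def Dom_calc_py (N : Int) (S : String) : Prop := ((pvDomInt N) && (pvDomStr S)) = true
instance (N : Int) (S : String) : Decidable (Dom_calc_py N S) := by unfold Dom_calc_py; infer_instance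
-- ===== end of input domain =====

-- B is an alternative two-pass decomposition (precomputed prefix last-x/last-o arrays, then a summing pass); equal return values on Pre_.

-- ===== PORT A =====
-- loop body of A's single fused loop; state = (x_idx, o_idx, result)
def calcAStep (L : List Char) (st : Int × Int × Int) (idx : Int) : Int × Int × Int :=
  let c := PySem.List.pyGetD L idx ' '
  let o_idx := if c = 'o' then idx else st.2.1
  let x_idx := if c = 'o' then st.1 else if c = 'x' then idx else st.1
  let result :=
    if 0 ≤ o_idx ∧ 0 ≤ x_idx then
      if c = 'o' then st.2.2 + (x_idx + 1)
      else if c = 'x' then st.2.2 + (o_idx + 1)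
      else st.2.2
    else st.2.2
  (x_idx, o_idx, result)

def calc_py (N : Int) (S : String) : Int :=
  ((PySem.List.pyRange 0 N 1).foldl (calcAStep S.toList) (-1, -1, 0)).2.2

-- ===== PORT B =====
-- first pass of B: state = (lx, lo, chars, last_x, last_o)
def calcBStep (L : List Char) (st : Int × Int × List Char × List Int × List Int) (i : Int) :
    Int × Int × List Char × List Int × List Int :=
  let c := PySem.List.pyGetD L i ' '
  let lx := if c = 'x' then i else st.1
  let lo := if c = 'x' then st.2.1 else if c = 'o' then i else st.2.1
  (lx, lo, st.2.2.1 ++ [c], st.2.2.2.1 ++ [lx], st.2.2.2.2 ++ [lo])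

-- second pass of B: one zipped row's contribution
def calcBRow (t : Int) (r : Char × Int × Int) : Int :=
  if r.1 = 'o' ∧ 0 ≤ r.2.1 then t + (r.2.1 + 1)
  else if r.1 = 'x' ∧ 0 ≤ r.2.2 then t + (r.2.2 + 1)
  else t

def calc_py_alt (N : Int) (S : String) : Int :=
  let st := (PySem.List.pyRange 0 N 1).foldl (calcBStep S.toList) (-1, -1, [], [], [])
  (st.2.2.1.zip (st.2.2.2.1.zip st.2.2.2.2)).foldl calcBRow 0

-- ===== PRECONDITION & SPEC =====
-- Pre_ excludes exactly N > len(S), where Python A raises IndexError on S[idx].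
def Pre_calc_py (N : Int) (S : String) : Prop := N ≤ (S.toList.length : Int)
instance (N : Int) (S : String) : Decidable (Pre_calc_py N S) := by unfold Pre_calc_py; infer_instance
def pvWitness_calc_py : Int × String := (4, "oxox")

def Spec_calc_py (N : Int) (S : String) (out : Int) : Prop := out = calc_py_alt N S
instance (N : Int) (S : String) (out : Int) : Decidable (Spec_calc_py N S out) := by unfold Spec_calc_py; infer_instance

-- ===== CLAIM (what is proved, stated in full; the proofs are below) =====
def Claim_equal_calc_py : Prop := ∀ (N : Int) (S : String), Dom_calc_py N S → Pre_calc_py N S → Spec_calc_py N S (calc_py N S)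

-- ===== LEMMAS AND PROOFS =====

-- invariant tying B's first-pass state and second-pass sum to A's running state
lemma calc_inv (L : List Char) (n : Nat) :
    (((PySem.List.pyRange 0 (n : Int) 1).foldl (calcBStep L) (-1, -1, [], [], [])).1
        = ((PySem.List.pyRange 0 (n : Int) 1).foldl (calcAStep L) (-1, -1, 0)).1)
  ∧ (((PySem.List.pyRange 0 (n : Int) 1).foldl (calcBStep L) (-1, -1, [], [], [])).2.1
        = ((PySem.List.pyRange 0 (n : Int) 1).foldl (calcAStep L) (-1, -1, 0)).2.1)
  ∧ ((PySem.List.pyRange 0 (n : Int) 1).foldl (calcBStep L) (-1, -1, [], [], [])).2.2.1.length = n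
  ∧ ((PySem.List.pyRange 0 (n : Int) 1).foldl (calcBStep L) (-1, -1, [], [], [])).2.2.2.1.length = n
  ∧ ((PySem.List.pyRange 0 (n : Int) 1).foldl (calcBStep L) (-1, -1, [], [], [])).2.2.2.2.length = n
  ∧ ((((PySem.List.pyRange 0 (n : Int) 1).foldl (calcBStep L) (-1, -1, [], [], [])).2.2.1.zip
        (((PySem.List.pyRange 0 (n : Int) 1).foldl (calcBStep L) (-1, -1, [], [], [])).2.2.2.1.zip
         ((PySem.List.pyRange 0 (n : Int) 1).foldl (calcBStep L) (-1, -1, [], [], [])).2.2.2.2)).foldl calcBRow 0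
        = ((PySem.List.pyRange 0 (n : Int) 1).foldl (calcAStep L) (-1, -1, 0)).2.2) := by
  induction n with
  | zero =>
    rw [show PySem.List.pyRange 0 ((0 : Nat) : Int) 1 = [] from PySem.List.pyRange_one_eq_nil (by simp)]
    simp
  | succ n ih =>
    have hn0 : (0 : Int) ≤ (n : Int) := by positivity
    have hsplit : PySem.List.pyRange 0 ((n + 1 : Nat) : Int) 1
        = PySem.List.pyRange 0 (n : Int) 1 ++ [(n : Int)] := by
      push_cast
      exact PySem.List.pyRange_one_succ_right hn0
    obtain ⟨h1, h2, h3, h4, h5, h6⟩ := ih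
    simp only [hsplit, List.foldl_append, List.foldl_cons, List.foldl_nil]
    set A := (PySem.List.pyRange 0 (n : Int) 1).foldl (calcAStep L) (-1, -1, 0) with hA
    set B := (PySem.List.pyRange 0 (n : Int) 1).foldl (calcBStep L) (-1, -1, [], [], []) with hB
    simp only [calcAStep, calcBStep]
    rw [List.zip_append (by rw [h4, h5]),
        List.zip_append (by rw [h3, List.length_zip, h4, h5]; simp),
        List.foldl_append]
    rw [h6]
    refine ⟨?_, ?_, by simp [h3], by simp [h4], by simp [h5], ?_⟩
    · by_cases hco : PySem.List.pyGetD L (n : Int) ' ' = 'o' <;>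
        by_cases hcx : PySem.List.pyGetD L (n : Int) ' ' = 'x' <;>
        simp_all
    · by_cases hco : PySem.List.pyGetD L (n : Int) ' ' = 'o' <;>
        by_cases hcx : PySem.List.pyGetD L (n : Int) ' ' = 'x' <;>
        simp_all
    · simp only [h1, h2]
      by_cases hco : PySem.List.pyGetD L (n : Int) ' ' = 'o' <;>
        by_cases hcx : PySem.List.pyGetD L (n : Int) ' ' = 'x' <;>
        simp_all [calcBRow]

-- ===== VERDICT (by name: the statement is the Claim_ definition above) =====
theorem calc_py_spec : Claim_equal_calc_py := by
  intro N S _ _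
  unfold Spec_calc_py calc_py calc_py_alt
  by_cases hN : N ≤ 0
  · rw [PySem.List.pyRange_one_eq_nil hN]
    simp
  · rw [not_le] at hN
    obtain ⟨n, rfl⟩ : ∃ n : Nat, N = (n : Int) := ⟨N.toNat, (Int.toNat_of_nonneg (le_of_lt hN)).symm⟩
    exact ((calc_inv S.toList n).2.2.2.2.2).symm
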